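-- pv_equiv track=rewrite | github.com/josedata6/BonusMidterm622 | bonus.py | groupOrdersByRoute
-- ===== SOURCE A (Python) =====
-- def groupOrdersByRoute(orders):
--     routeGroups = {} # Initializes an empty dictionary to store route groups
--
--     for order in orders:
--         route = order["route"] # Gets the route of the order
--         if route not in routeGroups: # Checks if the route is already in the dictionary
--             routeGroups[route] = [] # If not, it creates a new list for that route
--         routeGroups[route].append(order["trackingId"]) # Adds the tracking ID to the list for that route
--
--     return routeGroups
-- ===== SOURCE B (Python) =====
-- def groupOrdersByRoute(orders):
--     # Two-phase: collect distinct routes in first-seen order, then build each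
--     # group by re-scanning the orders for that route.
--     routes = []
--     for order in orders:
--         r = order["route"]
--         if r not in routes:
--             routes.append(r)
--     return {r: [o["trackingId"] for o in orders if o["route"] == r] for r in routes}
-- ===== Notes on version B (the rewrite author's own statement) =====
-- stated objective: alternative
-- what changed: Replaces A's single-pass dict accumulation with a two-phase strategy: one pass collecting the distinct routes in first-seen order, then a dict comprehension that re-scans the orders once per route to build each group.
import Mathlib
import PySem

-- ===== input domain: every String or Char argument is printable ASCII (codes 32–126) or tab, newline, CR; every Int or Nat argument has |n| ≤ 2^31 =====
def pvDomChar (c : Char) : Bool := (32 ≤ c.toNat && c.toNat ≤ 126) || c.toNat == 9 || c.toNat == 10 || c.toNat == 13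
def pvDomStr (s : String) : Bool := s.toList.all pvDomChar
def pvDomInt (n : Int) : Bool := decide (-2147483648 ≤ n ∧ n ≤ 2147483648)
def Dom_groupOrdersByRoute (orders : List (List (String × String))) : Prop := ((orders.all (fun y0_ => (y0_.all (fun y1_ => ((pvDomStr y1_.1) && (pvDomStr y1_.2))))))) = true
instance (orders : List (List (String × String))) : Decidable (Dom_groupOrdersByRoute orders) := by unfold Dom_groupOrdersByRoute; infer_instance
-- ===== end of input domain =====

-- B replaces A's single-pass dict accumulation by a two-phase build (distinct routes
-- in first-seen order, then one filtering re-scan of the orders per route); objective: alternative.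


-- ===== PORT A =====
-- shared field access: o["route"] / o["trackingId"] (first match in the assoc list;
-- Pre_ guarantees the key is present, so the "" default is never used on admitted inputs)
def pvRoute (o : List (String × String)) : String := ((PySem.Dict.mk o).get? "route").getD ""
def pvTid (o : List (String × String)) : String := ((PySem.Dict.mk o).get? "trackingId").getD ""

def groupOrdersByRoute (orders : List (List (String × String))) : List (String × List String) :=
  (orders.foldl
    (fun rg order =>
      let route := pvRoute order
      let rg' := if rg.contains route then rg else rg.insert route ([] : List String)
      rg'.modify route [] (fun l => l ++ [pvTid order]))
    PySem.Dict.empty).items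

-- ===== PORT B =====
def groupOrdersByRoute_alt (orders : List (List (String × String))) : List (String × List String) :=
  let routes : List String :=
    orders.foldl (fun acc order => PySem.Set.add acc (pvRoute order)) []
  routes.map (fun r => (r, (orders.filter (fun o => pvRoute o == r)).map pvTid))

-- ===== PRECONDITION & SPEC =====
-- Pre_ excludes exactly the inputs where Python A raises KeyError: an order missing "route" or "trackingId".
def Pre_groupOrdersByRoute (orders : List (List (String × String))) : Prop :=
  (orders.all (fun o => (PySem.Dict.mk o).contains "route" && (PySem.Dict.mk o).contains "trackingId")) = true
instance (orders : List (List (String × String))) : Decidable (Pre_groupOrdersByRoute orders) := by unfold Pre_groupOrdersByRoute; infer_instance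
def pvWitness_groupOrdersByRoute : (List (List (String × String))) :=
  [[("route", "A"), ("trackingId", "t1")], [("route", "B"), ("trackingId", "t2")], [("route", "A"), ("trackingId", "t3")]]

def Spec_groupOrdersByRoute (orders : List (List (String × String))) (out : List (String × List String)) : Prop := out = groupOrdersByRoute_alt orders
instance (orders : List (List (String × String))) (out : List (String × List String)) : Decidable (Spec_groupOrdersByRoute orders out) := by unfold Spec_groupOrdersByRoute; infer_instance

-- ===== CLAIM (what is proved, stated in full; the proofs are below) =====
def Claim_equal_groupOrdersByRoute : Prop := ∀ (orders : List (List (String × String))), Dom_groupOrdersByRoute orders → Pre_groupOrdersByRoute orders → Spec_groupOrdersByRoute orders (groupOrdersByRoute orders)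

-- ===== LEMMAS AND PROOFS =====

-- A's "setdefault then append" step is the modify step
theorem stepA_eq_modify (rg : PySem.Dict String (List String)) (o : List (String × String)) :
    (let route := pvRoute o
     let rg' := if rg.contains route then rg else rg.insert route ([] : List String)
     rg'.modify route [] (fun l => l ++ [pvTid o]))
      = rg.modify (pvRoute o) [] (fun l => l ++ [pvTid o]) := by
  by_cases h : rg.contains (pvRoute o)
  · simp [h]
  · simp only [h, Bool.false_eq_true, ite_false]
    show (rg.insert (pvRoute o) []).insert (pvRoute o) _ = rg.insert (pvRoute o) _
    rw [PySem.Dict.insert_insert_self, PySem.Dict.getD_insert_self,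
        PySem.Dict.getD_of_not_contains _ _ (by simpa using h)]

-- ===== VERDICT (by name: the statement is the Claim_ definition above) =====
theorem groupOrdersByRoute_spec : Claim_equal_groupOrdersByRoute := by
  intro orders _ _
  show groupOrdersByRoute orders = groupOrdersByRoute_alt orders
  unfold groupOrdersByRoute groupOrdersByRoute_alt
  simp only [stepA_eq_modify]
  have hfold : orders.foldl (fun rg o => rg.modify (pvRoute o) [] (fun l => l ++ [pvTid o]))
      PySem.Dict.empty
      = (orders.map (fun o => (pvRoute o, pvTid o))).foldl
          (fun rg p => rg.modify p.1 [] (fun l => l ++ [p.2])) PySem.Dict.empty := by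
    rw [List.foldl_map]
  rw [hfold]
  set l := orders.map (fun o => (pvRoute o, pvTid o)) with hl
  set d := l.foldl (fun rg p => rg.modify p.1 [] (fun l => l ++ [p.2])) PySem.Dict.empty with hd
  have hnd : d.keys.Nodup := by
    rw [hd]
    exact PySem.Dict.nodup_keys_foldl_modify_key l Prod.fst [] (fun _ p => (fun v => v ++ [p.2]))
      PySem.Dict.empty (by simp)
  have hkeys : d.keys = PySem.Set.ofList (orders.map pvRoute) := by
    rw [hd, PySem.Dict.keys_foldl_modify_key]
    simp [hl, List.map_map, Function.comp_def, PySem.Set.update_nil_left]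
  have hroutes : orders.foldl (fun acc o => PySem.Set.add acc (pvRoute o)) []
      = PySem.Set.ofList (orders.map pvRoute) := by
    rw [← PySem.Set.update_map_eq_foldl_add, PySem.Set.update_nil_left]
  rw [PySem.Dict.items_eq_map_keys d hnd [], hkeys, hroutes]
  refine List.map_congr_left (fun r _ => ?_)
  have hg : d.getD r [] = (l.filter (fun p => p.1 == r)).map (·.2) := by
    rw [hd]
    simpa using PySem.Dict.getD_foldl_modify_append l PySem.Dict.empty r
  rw [hg, hl, List.filter_map, List.map_map]
  simp [Function.comp_def]
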